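-- pv_equiv track=rewrite | github.com/LeraChernyakova/ETU | 4 семестр/2021 год/DaAA/Pavlov_Dmitry_lb1(py)/functions.py | find_possible
-- ===== SOURCE A (Python) =====
-- def check_sq(x, y, cur, map):
--     if (x + cur > len(map)) or (y + cur > len(map)):
--         return False
--     for i in range(x, x + cur):
--         for j in range(y, y + cur):
--             if map[j][i] != 0:
--                 return False
--     return True
--
-- def find_possible(map, cur):
--     var = []
--     for i in range(len(map)):
--         for j in range(len(map[i])):
--             if map[j][i] == 0:
--                 if check_sq(i, j, cur, map):
--                     var.append([i, j, cur])
--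
--     return var
-- ===== SOURCE B (Python) =====
-- def find_possible(map, cur):
--     n = len(map)
--     # pref[j][i] = number of nonzero cells map[jj][ii] with jj < j and ii < i
--     pref = [[0] * (n + 1)]
--     for j in range(n):
--         prev = pref[j]
--         row = [0]
--         for i in range(n):
--             row.append(prev[i + 1] + row[i] - prev[i] + (1 if map[j][i] != 0 else 0))
--         pref.append(row)
--     res = []
--     for i in range(n):
--         for j in range(len(map[i])):
--             if map[j][i] == 0:
--                 if i + cur <= n and j + cur <= n and \
--                         pref[j + cur][i + cur] - pref[j][i + cur] - pref[j + cur][i] + pref[j][i] == 0: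
--                     res.append([i, j, cur])
--     return res
-- ===== Notes on version B (the rewrite author's own statement) =====
-- stated objective: alternative
-- what changed: Replaced the per-position cur x cur brute-force rescans with a 2D prefix-sum table of nonzero cells built once, so each candidate square is tested by one rectangle-sum query; Pre_ restricts to square maps and cur >= 0: on ragged maps A's transposed indexing raises or returns accidental values, and for negative cur (a nonsensical square size) A's empty loops vacuously accept every zero cell while B's negative indices wrap or raise, both artefacts.
-- outside the precondition, e.g. on find_possible([[0, 0], [0]], 1): A returns [[0, 0, 1], [0, 1, 1], [1, 0, 1]], B raises IndexError; on find_possible([[0, 1], [0, 0]], -1): A returns [[0, 0, -1], [0, 1, -1], [1, 1, -1]], B returns [[1, 1, -1]]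
import Mathlib
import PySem

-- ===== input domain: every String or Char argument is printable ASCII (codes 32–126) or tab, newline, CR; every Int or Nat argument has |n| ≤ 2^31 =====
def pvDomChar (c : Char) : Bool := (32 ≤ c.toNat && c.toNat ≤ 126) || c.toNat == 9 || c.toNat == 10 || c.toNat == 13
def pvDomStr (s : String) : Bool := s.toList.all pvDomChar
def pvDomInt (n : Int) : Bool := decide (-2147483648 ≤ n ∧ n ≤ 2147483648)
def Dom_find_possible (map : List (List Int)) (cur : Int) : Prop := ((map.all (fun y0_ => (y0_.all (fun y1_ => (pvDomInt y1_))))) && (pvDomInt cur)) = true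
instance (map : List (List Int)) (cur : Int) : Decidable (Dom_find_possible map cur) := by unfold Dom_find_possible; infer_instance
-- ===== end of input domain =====

-- B replaces the per-position cur×cur rescans with a 2D prefix-sum table of nonzero
-- cells built once, so each candidate square is checked by one rectangle-sum query (objective: alternative).

-- ===== PORT A =====
def check_sq (x y cur : Int) (map : List (List Int)) : Bool :=
  if x + cur > (map.length : Int) || y + cur > (map.length : Int) then false
  else
    (PySem.List.pyRange x (x + cur) 1).all (fun i =>
      (PySem.List.pyRange y (y + cur) 1).all (fun j =>
        PySem.List.pyGetD (PySem.List.pyGetD map j []) i 0 == 0))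

def find_possible (map : List (List Int)) (cur : Int) : List (List Int) :=
  (PySem.List.pyRange 0 (map.length : Int) 1).foldl (fun var i =>
    (PySem.List.pyRange 0 ((PySem.List.pyGetD map i []).length : Int) 1).foldl (fun var j =>
      if PySem.List.pyGetD (PySem.List.pyGetD map j []) i 0 == 0 then
        if check_sq i j cur map then var ++ [[i, j, cur]] else var
      else var) var) []

-- ===== PORT B =====
-- row of the prefix table for python's inner `for i in range(n)` append loop
def pvBuildRow (prev mrow : List Int) (n : Int) : List Int :=
  (PySem.List.pyRange 0 n 1).foldl (fun row i =>
    row ++ [PySem.List.pyGetD prev (i + 1) 0 + PySem.List.pyGetD row i 0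
            - PySem.List.pyGetD prev i 0
            + (if PySem.List.pyGetD mrow i 0 ≠ 0 then 1 else 0)]) [0]

-- `pref` built by python's `for j in range(n)` loop
def pvBuildPref (map : List (List Int)) : List (List Int) :=
  (PySem.List.pyRange 0 (map.length : Int) 1).foldl (fun pref j =>
    pref ++ [pvBuildRow (PySem.List.pyGetD pref j []) (PySem.List.pyGetD map j [])
              (map.length : Int)]) [List.replicate (map.length + 1) 0]

def find_possible_alt (map : List (List Int)) (cur : Int) : List (List Int) :=
  let n : Int := (map.length : Int)
  let pref := pvBuildPref map
  (PySem.List.pyRange 0 n 1).foldl (fun res i =>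
    (PySem.List.pyRange 0 ((PySem.List.pyGetD map i []).length : Int) 1).foldl (fun res j =>
      if PySem.List.pyGetD (PySem.List.pyGetD map j []) i 0 == 0 then
        if i + cur ≤ n && j + cur ≤ n &&
            (PySem.List.pyGetD (PySem.List.pyGetD pref (j + cur) []) (i + cur) 0
             - PySem.List.pyGetD (PySem.List.pyGetD pref j []) (i + cur) 0
             - PySem.List.pyGetD (PySem.List.pyGetD pref (j + cur) []) i 0
             + PySem.List.pyGetD (PySem.List.pyGetD pref j []) i 0 == 0)
          then res ++ [[i, j, cur]] else res
      else res) res) []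

-- ===== PRECONDITION & SPEC =====
-- Pre_ restricts to square maps (every row as long as the map) and cur ≥ 0, the function's
-- natural domain: on ragged maps A's transposed indexing usually raises IndexError and B's
-- prefix indexing can raise too; for negative cur (a nonsensical square size) A's empty
-- loops vacuously accept every zero cell while B's negative indices wrap or raise — both
-- values there are artefacts, so those inputs are excluded.
def Pre_find_possible (map : List (List Int)) (cur : Int) : Prop :=
  (map.all (fun row => row.length == map.length)) = true ∧ 0 ≤ cur
instance (map : List (List Int)) (cur : Int) : Decidable (Pre_find_possible map cur) := by
  unfold Pre_find_possible; infer_instance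

def pvWitness_find_possible : List (List Int) × Int := ([[0, 1], [0, 0]], 1)

def Spec_find_possible (map : List (List Int)) (cur : Int) (out : List (List Int)) : Prop := out = find_possible_alt map cur
instance (map : List (List Int)) (cur : Int) (out : List (List Int)) : Decidable (Spec_find_possible map cur out) := by unfold Spec_find_possible; infer_instance

-- ===== CLAIM (what is proved, stated in full; the proofs are below) =====
def Claim_equal_find_possible : Prop := ∀ (map : List (List Int)) (cur : Int), Dom_find_possible map cur → Pre_find_possible map cur → Spec_find_possible map cur (find_possible map cur)

-- ===== LEMMAS AND PROOFS =====

-- number of nonzero in cell (row jj, column ii), and its prefix sums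
def pvInd (map : List (List Int)) (jj ii : Nat) : Int :=
  if (map.getD jj []).getD ii 0 ≠ 0 then 1 else 0

def pvS (map : List (List Int)) (j i : Nat) : Int :=
  ∑ jj ∈ Finset.range j, ∑ ii ∈ Finset.range i, pvInd map jj ii

def pvRowF (map : List (List Int)) (n j : Nat) : List Int :=
  (List.range (n + 1)).map (fun i => pvS map j i)

theorem pvGetD_map_range {α : Type} (f : Nat → α) (d : α) (n k : Nat) (h : k < n) :
    ((List.range n).map f).getD k d = f k := by
  simp [List.getD_eq_getElem?_getD, h]

theorem pvS_rec (map : List (List Int)) (j m : Nat) :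
    pvS map (j + 1) (m + 1)
      = pvS map j (m + 1) + pvS map (j + 1) m - pvS map j m + pvInd map j m := by
  simp only [pvS, Finset.sum_range_succ]
  ring

theorem pvBuildRow_spec (map : List (List Int)) (n j : Nat) :
    pvBuildRow (pvRowF map n j) (map.getD j []) (n : Int) = pvRowF map n (j + 1) := by
  have aux : ∀ m : Nat, m ≤ n →
      (PySem.List.pyRange 0 (m : Int) 1).foldl (fun row i =>
        row ++ [PySem.List.pyGetD (pvRowF map n j) (i + 1) 0 + PySem.List.pyGetD row i 0
                - PySem.List.pyGetD (pvRowF map n j) i 0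
                + (if PySem.List.pyGetD (map.getD j []) i 0 ≠ 0 then 1 else 0)]) [0]
      = (List.range (m + 1)).map (fun i => pvS map (j + 1) i) := by
    intro m
    induction m with
    | zero =>
      intro _
      rw [PySem.List.pyRange_one_eq_nil (by omega)]
      simp [pvS]
    | succ m ih =>
      intro hm
      have h1 : ((m : Int) + 1) = ((m + 1 : Nat) : Int) := by push_cast; ring
      rw [← h1, PySem.List.pyRange_one_succ_right (by positivity), List.foldl_append,
        ih (by omega)]
      simp only [List.foldl_cons, List.foldl_nil]
      have e1 : PySem.List.pyGetD (pvRowF map n j) ((m : Int) + 1) 0 = pvS map j (m + 1) := by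
        rw [h1, PySem.List.pyGetD_natCast]
        exact pvGetD_map_range _ _ _ _ (by omega)
      have e2 : PySem.List.pyGetD ((List.range (m + 1)).map (fun i => pvS map (j + 1) i))
          (m : Int) 0 = pvS map (j + 1) m := by
        rw [PySem.List.pyGetD_natCast]
        exact pvGetD_map_range _ _ _ _ (by omega)
      have e3 : PySem.List.pyGetD (pvRowF map n j) (m : Int) 0 = pvS map j m := by
        rw [PySem.List.pyGetD_natCast]
        exact pvGetD_map_range _ _ _ _ (by omega)
      have e4 : (if PySem.List.pyGetD (map.getD j []) (m : Int) 0 ≠ 0 then (1 : Int) else 0)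
          = pvInd map j m := by
        rw [PySem.List.pyGetD_natCast]
        simp [pvInd]
      rw [e1, e2, e3, e4, List.range_succ (n := m + 1), List.map_append]
      simp [pvS_rec map j m]
  have := aux n le_rfl
  unfold pvBuildRow pvRowF
  unfold pvRowF at this
  exact this

theorem pvBuildPref_spec (map : List (List Int)) :
    pvBuildPref map = (List.range (map.length + 1)).map (fun j => pvRowF map map.length j) := by
  set n := map.length with hn
  have aux : ∀ m : Nat, m ≤ n →
      (PySem.List.pyRange 0 (m : Int) 1).foldl (fun pref j =>
        pref ++ [pvBuildRow (PySem.List.pyGetD pref j []) (PySem.List.pyGetD map j [])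
                  (n : Int)]) [List.replicate (n + 1) 0]
      = (List.range (m + 1)).map (fun j => pvRowF map n j) := by
    intro m
    induction m with
    | zero =>
      intro _
      rw [PySem.List.pyRange_one_eq_nil (by omega)]
      have : pvRowF map n 0 = List.replicate (n + 1) (0 : Int) := by
        unfold pvRowF
        have : (fun i => pvS map 0 i) = (fun _ : Nat => (0 : Int)) := by
          funext i; simp [pvS]
        rw [this]
        simp
      simp [this]
    | succ m ih =>
      intro hm
      have h1 : ((m : Int) + 1) = ((m + 1 : Nat) : Int) := by push_cast; ring
      rw [← h1, PySem.List.pyRange_one_succ_right (by positivity), List.foldl_append,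
        ih (by omega)]
      simp only [List.foldl_cons, List.foldl_nil]
      have e1 : PySem.List.pyGetD ((List.range (m + 1)).map (fun j => pvRowF map n j))
          (m : Int) [] = pvRowF map n m := by
        rw [PySem.List.pyGetD_natCast]
        exact pvGetD_map_range _ _ _ _ (by omega)
      have e2 : PySem.List.pyGetD map (m : Int) [] = map.getD m [] := by
        rw [PySem.List.pyGetD_natCast]
      rw [e1, e2, pvBuildRow_spec map n m, List.range_succ (n := m + 1), List.map_append]
      simp
  unfold pvBuildPref
  exact aux n le_rfl

theorem pvPref_lookup (map : List (List Int)) (a b : Nat)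
    (ha : a ≤ map.length) (hb : b ≤ map.length) :
    PySem.List.pyGetD (PySem.List.pyGetD (pvBuildPref map) (a : Int) []) (b : Int) 0
      = pvS map a b := by
  rw [pvBuildPref_spec]
  have h1 : PySem.List.pyGetD
      ((List.range (map.length + 1)).map (fun j => pvRowF map map.length j)) (a : Int) []
      = pvRowF map map.length a := by
    rw [PySem.List.pyGetD_natCast]
    exact pvGetD_map_range _ _ _ _ (by omega)
  rw [h1, PySem.List.pyGetD_natCast]
  unfold pvRowF
  exact pvGetD_map_range _ _ _ _ (by omega)

theorem pvRect (map : List (List Int)) (a b c : Nat) :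
    pvS map (a + c) (b + c) - pvS map a (b + c) - pvS map (a + c) b + pvS map a b
      = ∑ jj ∈ Finset.Ico a (a + c), ∑ ii ∈ Finset.Ico b (b + c), pvInd map jj ii := by
  have inner : ∀ jj, ∑ ii ∈ Finset.Ico b (b + c), pvInd map jj ii
      = (∑ ii ∈ Finset.range (b + c), pvInd map jj ii)
        - ∑ ii ∈ Finset.range b, pvInd map jj ii := by
    intro jj
    rw [Finset.sum_Ico_eq_sub _ (by omega)]
  calc pvS map (a + c) (b + c) - pvS map a (b + c) - pvS map (a + c) b + pvS map a b
      = (∑ jj ∈ Finset.Ico a (a + c), ∑ ii ∈ Finset.range (b + c), pvInd map jj ii)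
        - ∑ jj ∈ Finset.Ico a (a + c), ∑ ii ∈ Finset.range b, pvInd map jj ii := by
        rw [Finset.sum_Ico_eq_sub _ (by omega : a ≤ a + c),
          Finset.sum_Ico_eq_sub _ (by omega : a ≤ a + c)]
        unfold pvS
        ring
    _ = _ := by
        rw [← Finset.sum_sub_distrib]
        exact Finset.sum_congr rfl (fun jj _ => (inner jj).symm)

theorem pvInd_nonneg (map : List (List Int)) (jj ii : Nat) : 0 ≤ pvInd map jj ii := by
  unfold pvInd; split_ifs <;> norm_num

theorem pvRectSum_zero_iff (map : List (List Int)) (a b c : Nat) :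
    (∑ jj ∈ Finset.Ico a (a + c), ∑ ii ∈ Finset.Ico b (b + c), pvInd map jj ii) = 0
      ↔ ∀ jj ∈ Finset.Ico a (a + c), ∀ ii ∈ Finset.Ico b (b + c),
          (map.getD jj []).getD ii 0 = 0 := by
  rw [Finset.sum_eq_zero_iff_of_nonneg
    (fun jj _ => Finset.sum_nonneg (fun ii _ => pvInd_nonneg map jj ii))]
  constructor
  · intro h jj hjj ii hii
    have h2 := (Finset.sum_eq_zero_iff_of_nonneg
      (fun ii _ => pvInd_nonneg map jj ii)).mp (h jj hjj) ii hii
    unfold pvInd at h2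
    by_contra hne
    rw [if_pos hne] at h2
    exact one_ne_zero h2
  · intro h jj hjj
    apply Finset.sum_eq_zero
    intro ii hii
    unfold pvInd
    rw [if_neg (not_not_intro (h jj hjj ii hii))]

-- the per-cell condition of A equals the prefix-sum condition of B (for cur ≥ 0)
theorem pvCheck_eq (map : List (List Int)) (cur i j : Int) (hcur : 0 ≤ cur)
    (hi0 : 0 ≤ i) (hiN : i < (map.length : Int)) (hj0 : 0 ≤ j) (hjN : j < (map.length : Int)) :
    check_sq i j cur map =
      (decide (i + cur ≤ (map.length : Int)) && decide (j + cur ≤ (map.length : Int)) &&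
        (PySem.List.pyGetD (PySem.List.pyGetD (pvBuildPref map) (j + cur) []) (i + cur) 0
         - PySem.List.pyGetD (PySem.List.pyGetD (pvBuildPref map) j []) (i + cur) 0
         - PySem.List.pyGetD (PySem.List.pyGetD (pvBuildPref map) (j + cur) []) i 0
         + PySem.List.pyGetD (PySem.List.pyGetD (pvBuildPref map) j []) i 0 == 0)) := by
  by_cases hbi : i + cur ≤ (map.length : Int)
  · by_cases hbj : j + cur ≤ (map.length : Int)
    · -- in-bounds square: brute-force scan ↔ rectangle sum = 0
      unfold check_sq
      rw [if_neg (by simp; omega)]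
      simp only [hbi, hbj, decide_true, Bool.true_and]
      set a := j.toNat with hA
      set b := i.toNat with hB
      set c := cur.toNat with hC
      have hja : j = (a : Int) := by omega
      have hib : i = (b : Int) := by omega
      have hjc : j + cur = ((a + c : Nat) : Int) := by push_cast; omega
      have hic : i + cur = ((b + c : Nat) : Int) := by push_cast; omega
      rw [hjc, hic]
      rw [pvPref_lookup map (a + c) (b + c) (by omega) (by omega)]
      rw [hja, hib]
      rw [pvPref_lookup map a (b + c) (by omega) (by omega)]
      rw [pvPref_lookup map (a + c) b (by omega) (by omega)]
      rw [pvPref_lookup map a b (by omega) (by omega)]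
      rw [Bool.eq_iff_iff]
      simp only [List.all_eq_true, PySem.List.mem_pyRange_one, beq_iff_eq]
      rw [pvRect map a b c, pvRectSum_zero_iff map a b c]
      constructor
      · intro h jj hjj ii hii
        have hii' : (b : Int) ≤ (ii : Int) ∧ (ii : Int) < (b : Int) + cur := by
          simp only [Finset.mem_Ico] at hii; constructor <;> [exact_mod_cast hii.1; omega]
        have hjj' : (a : Int) ≤ (jj : Int) ∧ (jj : Int) < (a : Int) + cur := by
          simp only [Finset.mem_Ico] at hjj; constructor <;> [exact_mod_cast hjj.1; omega]
        have := h (ii : Int) ⟨by omega, by omega⟩ (jj : Int) ⟨by omega, by omega⟩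
        rwa [PySem.List.pyGetD_natCast, PySem.List.pyGetD_natCast] at this
      · intro h ii hii jj hjj
        have hii' : ii.toNat ∈ Finset.Ico b (b + c) := by
          simp only [Finset.mem_Ico]; omega
        have hjj' : jj.toNat ∈ Finset.Ico a (a + c) := by
          simp only [Finset.mem_Ico]; omega
        have := h jj.toNat hjj' ii.toNat hii'
        have hjj2 : jj = ((jj.toNat : Nat) : Int) := by omega
        have hii2 : ii = ((ii.toNat : Nat) : Int) := by omega
        rw [hjj2, hii2, PySem.List.pyGetD_natCast, PySem.List.pyGetD_natCast]
        exact this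
    · unfold check_sq
      rw [if_pos (by simp; omega)]
      simp [hbj]
  · unfold check_sq
    rw [if_pos (by simp; omega)]
    simp [hbi]

-- ===== VERDICT (by name: the statement is the Claim_ definition above) =====
theorem find_possible_spec : Claim_equal_find_possible := by
  unfold Claim_equal_find_possible
  intro map cur _ hPre
  obtain ⟨hSq, hcur⟩ := hPre
  unfold Spec_find_possible find_possible find_possible_alt
  dsimp only
  apply PySem.List.foldl_congr_mem
  intro acc i hi
  rw [PySem.List.mem_pyRange_one] at hi
  apply PySem.List.foldl_congr_mem
  intro acc2 j hj
  rw [PySem.List.mem_pyRange_one] at hj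
  have hrow : (PySem.List.pyGetD map i []).length = map.length := by
    have hmem : PySem.List.pyGetD map i [] ∈ map := by
      rw [PySem.List.pyGetD_eq_getElem map [] hi.1 hi.2]
      exact List.getElem_mem _
    rw [List.all_eq_true] at hSq
    have := hSq _ hmem
    simpa using this
  have hjN : j < (map.length : Int) := by
    have := hj.2
    rw [hrow] at this
    exact this
  rw [pvCheck_eq map cur i j hcur hi.1 hi.2 hj.1 hjN]
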